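-- pv_equiv track=rewrite | github.com/samuelmurail/pdb_cpp | src/pdb_cpp/analysis.py | _count_chain_combinations
-- ===== SOURCE A (Python) =====
-- import math
-- from collections import Counter
--
-- def _count_chain_combinations(clusters):
--     """Return the number of valid chain-map permutations for *clusters*.
--
--     Mirrors ``DockQ.count_chain_combinations``.  *clusters* maps each key
--     (native or model chain) to the list of compatible counterpart chains.
--     The formula counts the number of ways to assign one counterpart per key
--     without repeats, grouping identical candidate lists together:
--
--     .. math::
--         \\prod_{\\text{unique cluster}} P(|\\text{cluster}|, k)
--
--     where *k* is the number of keys whose candidate list equals that cluster.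
--     """
--     cluster_tuples = [tuple(sorted(v)) for v in clusters.values()]
--     n_combos = 1
--     for cluster, k in Counter(cluster_tuples).items():
--         n = len(cluster)
--         if n < k:
--             return 0  # impossible to assign without repeats
--         n_combos *= math.factorial(n) // math.factorial(n - k)
--     return int(n_combos)
-- ===== SOURCE B (Python) =====
-- def _count_chain_combinations(clusters):
--     """Single stateful pass: multiply by the number of still-free counterpart
--     chains for each key's candidate list (no Counter, no factorials)."""
--     remaining = {}
--     n_combos = 1
--     for v in clusters.values():
--         key = tuple(sorted(v))
--         r = remaining.get(key, len(key))
--         n_combos *= r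
--         remaining[key] = r - 1
--     return n_combos
-- ===== Notes on version B (the rewrite author's own statement) =====
-- stated objective: simpler
-- what changed: Replaced the Counter+factorial-quotient product over grouped identical candidate lists (with an early return 0) by a single stateful pass that keeps a dict of still-free counterpart counts per sorted candidate tuple and multiplies them, letting over-subscription hit 0 naturally.
import Mathlib
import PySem

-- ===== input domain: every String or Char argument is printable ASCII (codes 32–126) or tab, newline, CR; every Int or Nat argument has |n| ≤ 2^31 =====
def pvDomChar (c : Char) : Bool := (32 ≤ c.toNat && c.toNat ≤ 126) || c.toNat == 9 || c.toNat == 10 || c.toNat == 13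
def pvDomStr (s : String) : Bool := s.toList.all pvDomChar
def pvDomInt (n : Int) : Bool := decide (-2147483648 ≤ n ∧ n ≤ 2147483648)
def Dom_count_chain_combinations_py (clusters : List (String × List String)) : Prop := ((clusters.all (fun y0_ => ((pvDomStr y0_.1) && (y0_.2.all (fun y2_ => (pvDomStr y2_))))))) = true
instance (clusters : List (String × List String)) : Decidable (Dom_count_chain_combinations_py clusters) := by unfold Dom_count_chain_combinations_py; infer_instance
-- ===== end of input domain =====

-- B replaces A's Counter + factorial-quotient grouping by one stateful pass over the
-- candidate lists that multiplies the still-free counterpart counts (objective: simpler).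

-- ===== PORT A =====
-- the loop 'for cluster, k in Counter(...).items(): if n < k: return 0; n_combos *= n!//(n-k)!'
def pvALoop : List (List String × Int) → Int → Int
  | [], acc => acc
  | (c, k) :: rest, acc =>
      if (c.length : Int) < k then 0
      else pvALoop rest (acc * PySem.Int.floordiv (Nat.factorial c.length) (Nat.factorial ((c.length : Int) - k).toNat))

def count_chain_combinations_py (clusters : List (String × List String)) : Int :=
  let cluster_tuples := clusters.map (fun p => PySem.List.sorted p.2 (fun s => s))
  pvALoop (PySem.Dict.counter cluster_tuples).items 1

-- ===== PORT B =====
-- the loop 'for v in clusters.values(): key = tuple(sorted(v)); r = remaining.get(key, len(key)); n_combos *= r; remaining[key] = r - 1'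
def pvBLoop : List (List String) → PySem.Dict (List String) Int → Int → Int
  | [], _, acc => acc
  | t :: rest, rem, acc =>
      let r := rem.getD t (t.length : Int)
      pvBLoop rest (rem.insert t (r - 1)) (acc * r)

def count_chain_combinations_py_alt (clusters : List (String × List String)) : Int :=
  let ts := clusters.map (fun p => PySem.List.sorted p.2 (fun s => s))
  pvBLoop ts PySem.Dict.empty 1

-- ===== PRECONDITION & SPEC =====
def Spec_count_chain_combinations_py (clusters : List (String × List String)) (out : Int) : Prop := out = count_chain_combinations_py_alt clusters
instance (clusters : List (String × List String)) (out : Int) : Decidable (Spec_count_chain_combinations_py clusters out) := by unfold Spec_count_chain_combinations_py; infer_instance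

-- ===== CLAIM (what is proved, stated in full; the proofs are below) =====
def Claim_equal_count_chain_combinations_py : Prop := ∀ (clusters : List (String × List String)), Dom_count_chain_combinations_py clusters → Spec_count_chain_combinations_py clusters (count_chain_combinations_py clusters)

-- ===== LEMMAS AND PROOFS =====

-- falling factorial n·(n-1)⋯(n-k+1), the common reference value of both loops
def pvFfall (n : Int) : Nat → Int
  | 0 => 1
  | k + 1 => pvFfall n k * (n - k)

theorem pvFfall_succ_shift (r : Int) (k : Nat) : pvFfall r (k + 1) = r * pvFfall (r - 1) k := by
  induction k with
  | zero => simp [pvFfall]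
  | succ m ih =>
      have : pvFfall r (m + 2) = pvFfall r (m + 1) * (r - (m + 1)) := rfl
      rw [this, ih]
      have : pvFfall (r - 1) (m + 1) = pvFfall (r - 1) m * (r - 1 - m) := rfl
      rw [this]
      ring

theorem pvFfall_zero_of_lt (n : Int) (k : Nat) (h0 : 0 ≤ n) (h : n < k) : pvFfall n k = 0 := by
  induction k with
  | zero => exact absurd (lt_of_le_of_lt h0 h) (by simp)
  | succ m ih =>
      by_cases hm : n < m
      · have : pvFfall n (m + 1) = pvFfall n m * (n - m) := rfl
        rw [this, ih hm, zero_mul]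
      · have hnm : n = m := by push_cast at h ⊢; omega
        have : pvFfall n (m + 1) = pvFfall n m * (n - m) := rfl
        rw [this, hnm]; simp

theorem pvFfall_mul_factorial (n k : Nat) (h : k ≤ n) :
    pvFfall (n : Int) k * (Nat.factorial (n - k) : Int) = (Nat.factorial n : Int) := by
  induction k with
  | zero => simp [pvFfall]
  | succ m ih =>
      have hm : m ≤ n := Nat.le_of_succ_le h
      have : pvFfall (n : Int) (m + 1) = pvFfall (n : Int) m * ((n : Int) - m) := rfl
      rw [this]
      have hsub : (n : Int) - m = ((n - m : Nat) : Int) := by omega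
      have hfac : n - m = (n - (m + 1)) + 1 := by omega
      have : (Nat.factorial (n - m) : Int) = ((n - m : Nat) : Int) * (Nat.factorial (n - (m + 1)) : Int) := by
        rw [hfac, Nat.factorial_succ]; push_cast; ring
      calc pvFfall (n : Int) m * ((n : Int) - m) * (Nat.factorial (n - (m + 1)) : Int)
          = pvFfall (n : Int) m * (((n - m : Nat) : Int) * (Nat.factorial (n - (m + 1)) : Int)) := by rw [hsub]; ring
        _ = pvFfall (n : Int) m * (Nat.factorial (n - m) : Int) := by rw [this]
        _ = (Nat.factorial n : Int) := ih hm

theorem pvFloordiv_fact (n k : Nat) (h : k ≤ n) :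
    PySem.Int.floordiv (Nat.factorial n) (Nat.factorial (((n : Int) - k).toNat)) = pvFfall (n : Int) k := by
  have hto : ((n : Int) - k).toNat = n - k := by omega
  rw [hto]
  have hne : (Nat.factorial (n - k) : Int) ≠ 0 := by
    exact_mod_cast Nat.factorial_ne_zero (n - k)
  have hmul := pvFfall_mul_factorial n k h
  have : PySem.Int.floordiv (Nat.factorial n) (Nat.factorial (n - k)) =
      PySem.Int.floordiv (pvFfall (n : Int) k * (Nat.factorial (n - k) : Int)) (Nat.factorial (n - k)) := by
    rw [hmul]
  rw [this]
  simp only [PySem.Int.floordiv]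
  exact Int.mul_fdiv_cancel _ hne

-- A's loop over '(cluster, count)' pairs is the product of falling factorials
theorem pvALoop_map (ts : List (List String)) (ds : List (List String)) : ∀ acc : Int,
    pvALoop (ds.map (fun d => (d, (ts.count d : Int)))) acc
      = acc * (ds.map (fun d => pvFfall (d.length : Int) (ts.count d))).prod := by
  induction ds with
  | nil => intro acc; simp [pvALoop]
  | cons d rest ih =>
      intro acc
      simp only [List.map_cons, List.prod_cons]
      by_cases hlt : (d.length : Int) < (ts.count d : Int)
      · have h0 : pvFfall (d.length : Int) (ts.count d) = 0 :=
          pvFfall_zero_of_lt _ _ (by positivity) (by exact_mod_cast hlt)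
        simp only [pvALoop, if_pos hlt, h0]
        ring
      · have hle : ts.count d ≤ d.length := by omega
        simp only [pvALoop, if_neg hlt]
        rw [ih, pvFloordiv_fact _ _ hle]
        ring

-- replace one factor of a product over a nodup list
theorem pvProd_map_update {α : Type} [DecidableEq α] (L : List α) (t : α) (f g : α → Int) (c : Int)
    (hL : L.Nodup) (ht : t ∈ L) (hne : ∀ d ∈ L, d ≠ t → f d = g d) (hft : f t = c * g t) :
    (L.map f).prod = c * (L.map g).prod := by
  induction L with
  | nil => cases ht
  | cons a L' ih =>
      simp only [List.map_cons, List.prod_cons]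
      rcases List.mem_cons.mp ht with rfl | htL'
      · have hmap : L'.map f = L'.map g := by
          apply List.map_congr_left
          intro d hd
          exact hne d (List.mem_cons_of_mem _ hd) (fun hdt => (List.nodup_cons.mp hL).1 (hdt ▸ hd))
        rw [hmap, hft]; ring
      · have hat : a ≠ t := fun h => (List.nodup_cons.mp hL).1 (h ▸ htL')
        rw [ih (List.nodup_cons.mp hL).2 htL' (fun d hd => hne d (List.mem_cons_of_mem _ hd)),
            hne a (List.mem_cons_self) hat]
        ring

theorem pvBLoop_acc (ts : List (List String)) : ∀ rem acc,
    pvBLoop ts rem acc = acc * pvBLoop ts rem 1 := by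
  induction ts with
  | nil => intro rem acc; simp [pvBLoop]
  | cons t rest ih =>
      intro rem acc
      simp only [pvBLoop]
      rw [ih _ (acc * _), ih _ (1 * _)]
      ring

-- B's loop computes the same product of falling factorials, over any nodup cover L
theorem pvBLoop_prod (ts : List (List String)) : ∀ (rem : PySem.Dict (List String) Int)
    (L : List (List String)), L.Nodup → (∀ d ∈ ts, d ∈ L) →
    pvBLoop ts rem 1 = (L.map (fun d => pvFfall (rem.getD d (d.length : Int)) (ts.count d))).prod := by
  induction ts with
  | nil =>
      intro rem L hL _
      simp only [pvBLoop, List.count_nil, pvFfall]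
      simp
  | cons t rest ih =>
      intro rem L hL hcov
      simp only [pvBLoop]
      rw [pvBLoop_acc, one_mul]
      rw [ih (rem.insert t (rem.getD t (t.length : Int) - 1)) L hL
          (fun d hd => hcov d (List.mem_cons_of_mem _ hd))]
      symm
      apply pvProd_map_update L t _ _ (rem.getD t (t.length : Int)) hL (hcov t List.mem_cons_self)
      · intro d _ hdt
        rw [PySem.Dict.getD_insert, if_neg hdt]
        simp [Ne.symm hdt]
      · rw [PySem.Dict.getD_insert, if_pos rfl, List.count_cons_self, pvFfall_succ_shift]

-- ===== VERDICT (by name: the statement is the Claim_ definition above) =====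
theorem count_chain_combinations_py_spec : Claim_equal_count_chain_combinations_py := by
  intro clusters _
  unfold Spec_count_chain_combinations_py
  show pvALoop (PySem.Dict.counter (clusters.map (fun p => PySem.List.sorted p.2 (fun s => s)))).items 1
      = pvBLoop (clusters.map (fun p => PySem.List.sorted p.2 (fun s => s))) PySem.Dict.empty 1
  generalize clusters.map (fun p => PySem.List.sorted p.2 (fun s => s)) = ts
  rw [PySem.Dict.items_counter]
  rw [pvALoop_map ts (PySem.Set.ofList ts) 1, one_mul]
  rw [pvBLoop_prod ts PySem.Dict.empty (PySem.Set.ofList ts)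
      (PySem.Set.nodup_ofList ts) (fun d hd => (PySem.Set.mem_ofList ts d).mpr hd)]
  simp [PySem.Dict.getD_empty]
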